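-- pv_equiv track=rewrite | github.com/kumarsuraj9798/Guardian | ml_service/decision_service.py | decide_service
-- ===== SOURCE A (Python) =====
-- from typing import Optional
--
-- def decide_service(text: Optional[str] = None, image_label: Optional[str] = None, audio_label: Optional[str] = None, has_image: bool = False) -> str:
--   s = (text or "").lower()
--
--   # Fire-related keywords (highest priority)
--   if any(k in s for k in ["fire", "smoke", "burn", "burning", "flame", "flames", "blaze", "house fire", "building fire", "fire emergency"]):
--     return "firebrigade"
--
--   # Police-related keywords
--   if any(k in s for k in ["attack", "theft", "police", "robbery", "crime", "violence", "assault", "break-in", "burglary"]):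
--     return "police"
--
--   # Medical/ambulance keywords
--   if any(k in s for k in ["accident", "injury", "ambulance", "medical", "hurt", "wounded", "emergency", "hospital", "doctor"]):
--     return "ambulance"
--
--   # Image label analysis
--   if image_label:
--     image_lower = image_label.lower()
--     if any(k in image_lower for k in ["fire", "smoke", "burn", "flame", "blaze"]):
--       return "firebrigade"
--     if any(k in image_lower for k in ["accident", "injury", "medical", "ambulance"]):
--       return "ambulance"
--     if any(k in image_lower for k in ["crime", "police", "theft", "violence"]):
--       return "police"
--
--   # Audio label analysis
--   if audio_label:
--     audio_lower = audio_label.lower()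
--     if any(k in audio_lower for k in ["scream", "gunshot", "alarm", "siren"]):
--       return "police"
--     if any(k in audio_lower for k in ["crying", "help", "emergency"]):
--       return "ambulance"
--
--   # If we have an image but no text, assume it might be a fire (common emergency)
--   if has_image and not text:
--     return "firebrigade"
--
--   # Default fallback
--   return "ambulance"
-- ===== SOURCE B (Python) =====
-- # B: instead of testing every keyword against the text with `any(k in s ...)`,
-- # index all keywords of each channel in ONE dict keyword -> priority rank, then
-- # slide over the source string once, looking every bounded-length n-gram up in
-- # the dict and keeping the smallest rank seen; the rank picks the service.
--
-- _TEXT = {"fire": 0, "smoke": 0, "burn": 0, "burning": 0, "flame": 0, "flames": 0,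
--          "blaze": 0, "house fire": 0, "building fire": 0, "fire emergency": 0,
--          "attack": 1, "theft": 1, "police": 1, "robbery": 1, "crime": 1,
--          "violence": 1, "assault": 1, "break-in": 1, "burglary": 1,
--          "accident": 2, "injury": 2, "ambulance": 2, "medical": 2, "hurt": 2,
--          "wounded": 2, "emergency": 2, "hospital": 2, "doctor": 2}
-- _TEXT_SVC = ["firebrigade", "police", "ambulance"]
-- _TEXT_MAXLEN = 14  # len("fire emergency")
--
-- _IMAGE = {"fire": 0, "smoke": 0, "burn": 0, "flame": 0, "blaze": 0,
--           "accident": 1, "injury": 1, "medical": 1, "ambulance": 1,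
--           "crime": 2, "police": 2, "theft": 2, "violence": 2}
-- _IMAGE_SVC = ["firebrigade", "ambulance", "police"]
-- _IMAGE_MAXLEN = 9  # len("ambulance")
--
-- _AUDIO = {"scream": 0, "gunshot": 0, "alarm": 0, "siren": 0,
--           "crying": 1, "help": 1, "emergency": 1}
-- _AUDIO_SVC = ["police", "ambulance"]
-- _AUDIO_MAXLEN = 9  # len("emergency")
--
--
-- def _best_rank(src, table, max_len):
--     """Smallest rank of any table keyword occurring in src, found by looking
--     up every substring of length <= max_len in the keyword index."""
--     best = None
--     n = len(src)
--     for i in range(n):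
--         top = min(n, i + max_len)
--         for j in range(i + 1, top + 1):
--             r = table.get(src[i:j])
--             if r is not None and (best is None or r < best):
--                 best = r
--     return best
--
--
-- def decide_service(text=None, image_label=None, audio_label=None, has_image=False):
--     r = _best_rank((text or "").lower(), _TEXT, _TEXT_MAXLEN)
--     if r is not None:
--         return _TEXT_SVC[r]
--     if image_label:
--         r = _best_rank(image_label.lower(), _IMAGE, _IMAGE_MAXLEN)
--         if r is not None:
--             return _IMAGE_SVC[r]
--     if audio_label:
--         r = _best_rank(audio_label.lower(), _AUDIO, _AUDIO_MAXLEN)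
--         if r is not None:
--             return _AUDIO_SVC[r]
--     return "firebrigade" if has_image and not text else "ambulance"
-- ===== Notes on version B (the rewrite author's own statement) =====
-- stated objective: alternative
-- what changed: Instead of testing every keyword of every group against the source with any(k in s), B builds one keyword->priority-rank dictionary per channel, slides a bounded window over the source looking each n-gram up in the dictionary, keeps the minimal rank seen, and maps that rank to the service.
import Mathlib
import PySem

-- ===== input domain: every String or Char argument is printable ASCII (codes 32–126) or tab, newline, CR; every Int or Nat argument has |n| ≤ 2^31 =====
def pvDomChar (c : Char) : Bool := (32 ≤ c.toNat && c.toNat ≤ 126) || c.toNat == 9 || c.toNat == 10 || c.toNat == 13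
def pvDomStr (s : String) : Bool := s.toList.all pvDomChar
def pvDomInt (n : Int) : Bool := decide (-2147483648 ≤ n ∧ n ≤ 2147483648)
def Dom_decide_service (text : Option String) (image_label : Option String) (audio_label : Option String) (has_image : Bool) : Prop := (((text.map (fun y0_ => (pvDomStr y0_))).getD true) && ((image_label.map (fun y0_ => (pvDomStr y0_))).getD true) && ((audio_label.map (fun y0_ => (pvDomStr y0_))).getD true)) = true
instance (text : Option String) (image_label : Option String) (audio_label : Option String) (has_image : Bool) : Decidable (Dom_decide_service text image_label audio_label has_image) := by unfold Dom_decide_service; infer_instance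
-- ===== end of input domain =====

-- B replaces A's per-keyword `any(k in s)` cascade by one keyword→rank dictionary per
-- channel, scanned by sliding-window n-gram lookup keeping the minimal rank ('alternative').

-- ===== PORT A =====
-- Python truthiness of an Optional[str]: non-None and non-empty
def pyTruthyStr (o : Option String) : Bool := !(o.getD "" == "")

def decide_service (text : Option String) (image_label : Option String) (audio_label : Option String) (has_image : Bool) : String :=
  let s := PySem.Str.lower (text.getD "")
  -- tail after the audio block: 'if has_image and not text: return "firebrigade"; return "ambulance"'
  let tail3 : Unit → String := fun _ =>
    if has_image && !pyTruthyStr text then "firebrigade" else "ambulance"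
  -- audio-label block falls through to tail3
  let tail2 : Unit → String := fun _ =>
    if pyTruthyStr audio_label then
      let audio_lower := PySem.Str.lower (audio_label.getD "")
      if ["scream", "gunshot", "alarm", "siren"].any (fun k => PySem.Str.isIn k audio_lower) then "police"
      else if ["crying", "help", "emergency"].any (fun k => PySem.Str.isIn k audio_lower) then "ambulance"
      else tail3 ()
    else tail3 ()
  if ["fire", "smoke", "burn", "burning", "flame", "flames", "blaze", "house fire", "building fire", "fire emergency"].any (fun k => PySem.Str.isIn k s) then "firebrigade"
  else if ["attack", "theft", "police", "robbery", "crime", "violence", "assault", "break-in", "burglary"].any (fun k => PySem.Str.isIn k s) then "police"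
  else if ["accident", "injury", "ambulance", "medical", "hurt", "wounded", "emergency", "hospital", "doctor"].any (fun k => PySem.Str.isIn k s) then "ambulance"
  else if pyTruthyStr image_label then
    let image_lower := PySem.Str.lower (image_label.getD "")
    if ["fire", "smoke", "burn", "flame", "blaze"].any (fun k => PySem.Str.isIn k image_lower) then "firebrigade"
    else if ["accident", "injury", "medical", "ambulance"].any (fun k => PySem.Str.isIn k image_lower) then "ambulance"
    else if ["crime", "police", "theft", "violence"].any (fun k => PySem.Str.isIn k image_lower) then "police"
    else tail2 ()
  else tail2 ()

-- ===== PORT B =====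
-- one keyword → priority-rank index per channel (Source B's module-level dicts)
def pvTextPairs : List (String × Nat) :=
  [("fire", 0), ("smoke", 0), ("burn", 0), ("burning", 0), ("flame", 0), ("flames", 0),
   ("blaze", 0), ("house fire", 0), ("building fire", 0), ("fire emergency", 0),
   ("attack", 1), ("theft", 1), ("police", 1), ("robbery", 1), ("crime", 1),
   ("violence", 1), ("assault", 1), ("break-in", 1), ("burglary", 1),
   ("accident", 2), ("injury", 2), ("ambulance", 2), ("medical", 2), ("hurt", 2),
   ("wounded", 2), ("emergency", 2), ("hospital", 2), ("doctor", 2)]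
def pvTextTbl : PySem.Dict String Nat := PySem.Dict.ofList pvTextPairs
def pvTextSvc : List String := ["firebrigade", "police", "ambulance"]

def pvImagePairs : List (String × Nat) :=
  [("fire", 0), ("smoke", 0), ("burn", 0), ("flame", 0), ("blaze", 0),
   ("accident", 1), ("injury", 1), ("medical", 1), ("ambulance", 1),
   ("crime", 2), ("police", 2), ("theft", 2), ("violence", 2)]
def pvImageTbl : PySem.Dict String Nat := PySem.Dict.ofList pvImagePairs
def pvImageSvc : List String := ["firebrigade", "ambulance", "police"]

def pvAudioPairs : List (String × Nat) :=
  [("scream", 0), ("gunshot", 0), ("alarm", 0), ("siren", 0),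
   ("crying", 1), ("help", 1), ("emergency", 1)]
def pvAudioTbl : PySem.Dict String Nat := PySem.Dict.ofList pvAudioPairs
def pvAudioSvc : List String := ["police", "ambulance"]

-- Source B's _best_rank: slide over src, look every n-gram of length ≤ maxLen up in the
-- index, keep the smallest rank.  src[i:j] on a str is exactly drop/take on .toList.
def pvBestRank (src : List Char) (tbl : PySem.Dict String Nat) (maxLen : Nat) : Option Nat :=
  (List.range src.length).foldl (fun best i =>
    (List.range' (i + 1) (min src.length (i + maxLen) - i)).foldl (fun best j =>
      match tbl.get? (String.ofList ((src.drop i).take (j - i))) with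
      | none => best
      | some r =>
        match best with
        | none => some r
        | some b => if r < b then some r else some b) best) none

def decide_service_alt (text : Option String) (image_label : Option String) (audio_label : Option String) (has_image : Bool) : String :=
  match pvBestRank (PySem.Str.lower (text.getD "")).toList pvTextTbl 14 with
  | some r => pvTextSvc.getD r ""              -- services[r]; r is always a valid index
  | none =>
    match (if pyTruthyStr image_label then pvBestRank (PySem.Str.lower (image_label.getD "")).toList pvImageTbl 9 else none) with
    | some r => pvImageSvc.getD r ""
    | none =>
      match (if pyTruthyStr audio_label then pvBestRank (PySem.Str.lower (audio_label.getD "")).toList pvAudioTbl 9 else none) with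
      | some r => pvAudioSvc.getD r ""
      | none => if has_image && !pyTruthyStr text then "firebrigade" else "ambulance"

-- ===== PRECONDITION & SPEC =====
def Spec_decide_service (text : Option String) (image_label : Option String) (audio_label : Option String) (has_image : Bool) (out : String) : Prop := out = decide_service_alt text image_label audio_label has_image
instance (text : Option String) (image_label : Option String) (audio_label : Option String) (has_image : Bool) (out : String) : Decidable (Spec_decide_service text image_label audio_label has_image out) := by unfold Spec_decide_service; infer_instance

-- ===== CLAIM =====
def Claim_equal_decide_service : Prop := ∀ (text : Option String) (image_label : Option String) (audio_label : Option String) (has_image : Bool), Dom_decide_service text image_label audio_label has_image → Spec_decide_service text image_label audio_label has_image (decide_service text image_label audio_label has_image)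

-- ===== LEMMAS AND PROOFS =====

-- running 'best' update of Source B's inner loop
def pvOMin (a : Option Nat) (r : Nat) : Option Nat :=
  match a with
  | none => some r
  | some b => if r < b then some r else some b

-- the ranks of all dictionary hits, as one flat list
def pvAllMatches (src : List Char) (tbl : PySem.Dict String Nat) (maxLen : Nat) : List Nat :=
  (List.range src.length).flatMap (fun i =>
    (List.range' (i + 1) (min src.length (i + maxLen) - i)).filterMap (fun j =>
      tbl.get? (String.ofList ((src.drop i).take (j - i)))))

lemma pvBestRank_eq (src : List Char) (tbl : PySem.Dict String Nat) (maxLen : Nat) :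
    pvBestRank src tbl maxLen = (pvAllMatches src tbl maxLen).foldl pvOMin none := by
  unfold pvBestRank pvAllMatches
  rw [List.foldl_flatMap]
  simp only [List.foldl_filterMap]
  congr 1
  funext best i
  congr 1
  funext acc j
  cases tbl.get? (String.ofList (List.take (j - i) (List.drop i src))) <;> rfl

lemma pvOMin_some (b r : Nat) : pvOMin (some b) r = some (min b r) := by
  simp only [pvOMin, Nat.min_def]
  split_ifs <;> first | rfl | omega

lemma pvFoldl_pvOMin_some (l : List Nat) (b : Nat) :
    l.foldl pvOMin (some b) = some (l.foldl min b) := by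
  induction l generalizing b with
  | nil => rfl
  | cons a t ih => simp [List.foldl_cons, pvOMin_some, ih]

lemma pvM_eq_some_of (l : List Nat) (m : Nat) (hm : m ∈ l) (hb : ∀ b ∈ l, m ≤ b) :
    l.foldl pvOMin none = some m := by
  cases l with
  | nil => cases hm
  | cons a t =>
    have h1 : (a :: t).foldl pvOMin none = some (t.foldl min a) := by
      simp [List.foldl_cons, pvOMin, pvFoldl_pvOMin_some]
    rw [h1]
    have hmem : t.foldl min a = a ∨ t.foldl min a ∈ t := PySem.List.foldl_min_mem t a
    have hle := PySem.List.foldl_min_le t a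
    have hfm : t.foldl min a ∈ a :: t := by
      rcases hmem with h | h
      · rw [h]; exact List.mem_cons_self
      · exact List.mem_cons_of_mem _ h
    have h2 : m ≤ t.foldl min a := hb _ hfm
    have h3 : t.foldl min a ≤ m := by
      rcases List.mem_cons.mp hm with rfl | h
      · exact hle.1
      · exact hle.2 _ h
    have : t.foldl min a = m := le_antisymm h3 h2
    rw [this]

lemma pvM_eq_none_of (l : List Nat) (h : ∀ b : Nat, b ∉ l) :
    l.foldl pvOMin none = none := by
  have : l = [] := List.eq_nil_iff_forall_not_mem.mpr h
  rw [this]; rfl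

lemma pv_mem_allMatches (src : List Char) (tbl : PySem.Dict String Nat) (maxLen r : Nat) :
    r ∈ pvAllMatches src tbl maxLen ↔
      ∃ i j, i < src.length ∧ i + 1 ≤ j ∧ j ≤ min src.length (i + maxLen) ∧
        tbl.get? (String.ofList ((src.drop i).take (j - i))) = some r := by
  unfold pvAllMatches
  simp only [List.mem_flatMap, List.mem_filterMap, List.mem_range, List.mem_range']
  constructor
  · rintro ⟨i, hi, j, ⟨t, ht, rfl⟩, hj⟩
    exact ⟨i, i + 1 + 1 * t, hi, by omega, by omega, hj⟩
  · rintro ⟨i, j, hi, hij, hjm, hj⟩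
    exact ⟨i, hi, j, ⟨j - (i + 1), by omega, by omega⟩, hj⟩

-- a bounded n-gram of src equals k  ↔  k occurs in src (Python's 'k in src')
lemma pv_sub_iff (k src : List Char) (L : Nat) (hk : k ≠ []) (hL : k.length ≤ L) :
    (∃ i j, i < src.length ∧ i + 1 ≤ j ∧ j ≤ min src.length (i + L) ∧
      (src.drop i).take (j - i) = k) ↔ PySem.Chars.isIn k src = true := by
  rw [← PySem.Chars.exists_prefix_drop_iff_isIn]
  constructor
  · rintro ⟨i, j, _, _, _, rfl⟩
    exact ⟨i, List.take_prefix _ _⟩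
  · rintro ⟨i, hpre⟩
    have hklen : 0 < k.length := List.length_pos_iff.mpr hk
    have hi : i < src.length := by
      by_contra h
      have : src.drop i = [] := List.drop_eq_nil_of_le (by omega)
      rw [this] at hpre
      exact hk (List.prefix_nil.mp hpre)
    have hlen : k.length ≤ src.length - i := by
      have := hpre.length_le
      simpa [List.length_drop] using this
    refine ⟨i, i + k.length, hi, by omega, by omega, ?_⟩
    have := List.prefix_iff_eq_take.mp hpre
    rw [show i + k.length - i = k.length by omega]
    exact this.symm

lemma pv_get?_mk_eq_some_iff (pairs : List (String × Nat)) (x : String) (r : Nat)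
    (h : (pairs.map Prod.fst).Nodup) :
    (PySem.Dict.mk pairs).get? x = some r ↔ ∃ p ∈ pairs, p.1 = x ∧ p.2 = r := by
  induction pairs with
  | nil => simp [PySem.Dict.get?]
  | cons p rest ih =>
    obtain ⟨k, v⟩ := p
    rw [PySem.Dict.get?_mk_cons]
    simp only [List.map_cons, List.nodup_cons] at h
    by_cases hkx : k = x
    · subst hkx
      simp only [beq_self_eq_true, if_true]
      constructor
      · rintro h'
        exact ⟨(k, v), List.mem_cons_self, rfl, by injection h'⟩
      · rintro ⟨⟨k', v'⟩, hmem, rfl, rfl⟩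
        rcases List.mem_cons.mp hmem with h' | h'
        · injection h' with h1 h2; rw [h2]
        · exact absurd (List.mem_map.mpr ⟨_, h', rfl⟩) h.1
    · have : (k == x) = false := beq_eq_false_iff_ne.mpr hkx
      rw [this]
      simp only [Bool.false_eq_true, if_false]
      rw [ih h.2]
      constructor
      · rintro ⟨p, hp, h1, h2⟩; exact ⟨p, List.mem_cons_of_mem _ hp, h1, h2⟩
      · rintro ⟨p, hp, h1, h2⟩
        rcases List.mem_cons.mp hp with rfl | hp'
        · exact absurd h1 hkx
        · exact ⟨p, hp', h1, h2⟩

lemma pv_mem_matches_table (pairs : List (String × Nat)) (src : List Char) (L r : Nat)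
    (hnd : (pairs.map Prod.fst).Nodup)
    (hlen : ∀ p ∈ pairs, p.1.toList ≠ [] ∧ p.1.toList.length ≤ L) :
    r ∈ pvAllMatches src (PySem.Dict.mk pairs) L ↔
      ∃ p ∈ pairs, p.2 = r ∧ PySem.Chars.isIn p.1.toList src = true := by
  rw [pv_mem_allMatches]
  constructor
  · rintro ⟨i, j, hi, hij, hjm, hget⟩
    obtain ⟨p, hp, hpx, hpr⟩ := (pv_get?_mk_eq_some_iff pairs _ r hnd).mp hget
    refine ⟨p, hp, hpr, ?_⟩
    have hsub : (src.drop i).take (j - i) = p.1.toList := by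
      rw [hpx]; simp [String.toList_ofList]
    exact (pv_sub_iff p.1.toList src L (hlen p hp).1 (hlen p hp).2).mp ⟨i, j, hi, hij, hjm, hsub⟩
  · rintro ⟨p, hp, hpr, hin⟩
    obtain ⟨i, j, hi, hij, hjm, hsub⟩ :=
      (pv_sub_iff p.1.toList src L (hlen p hp).1 (hlen p hp).2).mpr hin
    refine ⟨i, j, hi, hij, hjm, ?_⟩
    rw [(pv_get?_mk_eq_some_iff pairs _ r hnd)]
    exact ⟨p, hp, by rw [hsub]; exact String.ofList_toList.symm, hpr⟩

lemma pvTextTbl_eq : pvTextTbl = PySem.Dict.mk pvTextPairs := by decide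
lemma pvImageTbl_eq : pvImageTbl = PySem.Dict.mk pvImagePairs := by decide
lemma pvAudioTbl_eq : pvAudioTbl = PySem.Dict.mk pvAudioPairs := by decide

lemma pv_isIn_eq (k s : String) : PySem.Str.isIn k s = PySem.Chars.isIn k.toList s.toList := by
  simp [PySem.Str.isIn]

-- generic three-group scan characterization: the minimal matched rank is the first
-- group (in rank order) containing a keyword that occurs in s
lemma pv_scan_core (pairs : List (String × Nat)) (s : String) (L : Nat)
    (g0 g1 g2 : List String)
    (hnd : (pairs.map Prod.fst).Nodup)
    (hlen : ∀ p ∈ pairs, p.1.toList ≠ [] ∧ p.1.toList.length ≤ L)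
    (h0 : ∀ x ∈ g0, (x, 0) ∈ pairs) (h1 : ∀ x ∈ g1, (x, 1) ∈ pairs)
    (h2 : ∀ x ∈ g2, (x, 2) ∈ pairs)
    (hr0 : ∀ p ∈ pairs, p.2 = 0 → p.1 ∈ g0) (hr1 : ∀ p ∈ pairs, p.2 = 1 → p.1 ∈ g1)
    (hr2 : ∀ p ∈ pairs, p.2 = 2 → p.1 ∈ g2)
    (hrb : ∀ p ∈ pairs, p.2 ≤ 2) :
    (pvAllMatches s.toList (PySem.Dict.mk pairs) L).foldl pvOMin none =
      (if g0.any (fun k => PySem.Str.isIn k s) then some 0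
       else if g1.any (fun k => PySem.Str.isIn k s) then some 1
       else if g2.any (fun k => PySem.Str.isIn k s) then some 2
       else none) := by
  have hmem := fun r => pv_mem_matches_table pairs s.toList L r hnd hlen
  split_ifs with hF hP hM
  · obtain ⟨k, hk, hin⟩ := List.any_eq_true.mp hF
    exact pvM_eq_some_of _ 0
      ((hmem 0).mpr ⟨(k, 0), h0 k hk, rfl, by rw [← pv_isIn_eq]; exact hin⟩)
      (fun b _ => Nat.zero_le _)
  · obtain ⟨k, hk, hin⟩ := List.any_eq_true.mp hP
    refine pvM_eq_some_of _ 1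
      ((hmem 1).mpr ⟨(k, 1), h1 k hk, rfl, by rw [← pv_isIn_eq]; exact hin⟩) ?_
    intro b hb
    obtain ⟨p, hp, hpr, hpin⟩ := (hmem b).mp hb
    rcases Nat.eq_zero_or_pos b with rfl | hpos
    · exact absurd (List.any_eq_true.mpr ⟨p.1, hr0 p hp hpr, by rw [pv_isIn_eq]; exact hpin⟩) hF
    · exact hpos
  · obtain ⟨k, hk, hin⟩ := List.any_eq_true.mp hM
    refine pvM_eq_some_of _ 2
      ((hmem 2).mpr ⟨(k, 2), h2 k hk, rfl, by rw [← pv_isIn_eq]; exact hin⟩) ?_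
    intro b hb
    obtain ⟨p, hp, hpr, hpin⟩ := (hmem b).mp hb
    have hins : PySem.Str.isIn p.1 s = true := by rw [pv_isIn_eq]; exact hpin
    have hb2 : b ≤ 2 := hpr ▸ hrb p hp
    rcases Nat.lt_or_ge b 2 with hlt | hge
    · interval_cases b
      · exact absurd (List.any_eq_true.mpr ⟨p.1, hr0 p hp hpr, hins⟩) hF
      · exact absurd (List.any_eq_true.mpr ⟨p.1, hr1 p hp hpr, hins⟩) hP
    · exact hge
  · refine pvM_eq_none_of _ ?_
    intro b hb
    obtain ⟨p, hp, hpr, hpin⟩ := (hmem b).mp hb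
    have hins : PySem.Str.isIn p.1 s = true := by rw [pv_isIn_eq]; exact hpin
    have hb2 : b ≤ 2 := hpr ▸ hrb p hp
    interval_cases b
    · exact absurd (List.any_eq_true.mpr ⟨p.1, hr0 p hp hpr, hins⟩) hF
    · exact absurd (List.any_eq_true.mpr ⟨p.1, hr1 p hp hpr, hins⟩) hP
    · exact absurd (List.any_eq_true.mpr ⟨p.1, hr2 p hp hpr, hins⟩) hM

lemma pv_text_scan (s : String) :
    pvBestRank s.toList pvTextTbl 14 =
      (if ["fire", "smoke", "burn", "burning", "flame", "flames", "blaze", "house fire", "building fire", "fire emergency"].any (fun k => PySem.Str.isIn k s) then some 0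
       else if ["attack", "theft", "police", "robbery", "crime", "violence", "assault", "break-in", "burglary"].any (fun k => PySem.Str.isIn k s) then some 1
       else if ["accident", "injury", "ambulance", "medical", "hurt", "wounded", "emergency", "hospital", "doctor"].any (fun k => PySem.Str.isIn k s) then some 2
       else none) := by
  rw [pvBestRank_eq, pvTextTbl_eq]
  exact pv_scan_core pvTextPairs s 14 _ _ _
    (by decide) (by decide) (by decide) (by decide) (by decide)
    (by decide) (by decide) (by decide) (by decide)

lemma pv_image_scan (s : String) :
    pvBestRank s.toList pvImageTbl 9 =
      (if ["fire", "smoke", "burn", "flame", "blaze"].any (fun k => PySem.Str.isIn k s) then some 0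
       else if ["accident", "injury", "medical", "ambulance"].any (fun k => PySem.Str.isIn k s) then some 1
       else if ["crime", "police", "theft", "violence"].any (fun k => PySem.Str.isIn k s) then some 2
       else none) := by
  rw [pvBestRank_eq, pvImageTbl_eq]
  exact pv_scan_core pvImagePairs s 9 _ _ _
    (by decide) (by decide) (by decide) (by decide) (by decide)
    (by decide) (by decide) (by decide) (by decide)

lemma pv_audio_scan (s : String) :
    pvBestRank s.toList pvAudioTbl 9 =
      (if ["scream", "gunshot", "alarm", "siren"].any (fun k => PySem.Str.isIn k s) then some 0
       else if ["crying", "help", "emergency"].any (fun k => PySem.Str.isIn k s) then some 1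
       else none) := by
  rw [pvBestRank_eq, pvAudioTbl_eq]
  have h := pv_scan_core pvAudioPairs s 9
    ["scream", "gunshot", "alarm", "siren"] ["crying", "help", "emergency"] []
    (by decide) (by decide) (by decide) (by decide) (by decide)
    (by decide) (by decide) (by decide) (by decide)
  simpa using h

-- ===== VERDICT =====
set_option maxHeartbeats 1600000 in
theorem decide_service_spec : Claim_equal_decide_service := by
  intro text image_label audio_label has_image _
  unfold Spec_decide_service decide_service decide_service_alt
  simp only [pv_text_scan, pv_image_scan, pv_audio_scan]
  split_ifs <;> rfl
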